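-- pv_equiv track=rewrite | github.com/ktchow1/hackerrank | vector game.py | count_div_by_target_subseq_sum
-- ===== SOURCE A (Python) =====
-- def count_div_by_target_subseq_sum(vec, target) :
--     cum  = 0
--     hist = {}
--     ans  = 0
--     for n in range(len(vec)) :
--         cum = cum + vec[n]
--         tmp = cum % target
--
--         # merge task 1&2, avoid repeated calculation with tmp
--         if tmp == 0 : ans = ans + 1
--         if tmp in hist :
--             ans = ans + hist[tmp]
--             hist[tmp] = hist[tmp] + 1
--         else : hist[tmp] = 1
--     return ans
-- ===== SOURCE B (Python) =====
-- def count_div_by_target_subseq_sum(vec, target):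
--     ans = 0
--     for i in range(len(vec)):
--         s = 0
--         for j in range(i, len(vec)):
--             s += vec[j]
--             if s % target == 0:
--                 ans += 1
--     return ans
-- ===== Notes on version B (the rewrite author's own statement) =====
-- stated objective: simpler
-- what changed: Replaced the prefix-sum residue hashmap with a plain double loop that keeps a running sum per start index and counts every contiguous subarray whose sum is divisible by target.
import Mathlib
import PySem

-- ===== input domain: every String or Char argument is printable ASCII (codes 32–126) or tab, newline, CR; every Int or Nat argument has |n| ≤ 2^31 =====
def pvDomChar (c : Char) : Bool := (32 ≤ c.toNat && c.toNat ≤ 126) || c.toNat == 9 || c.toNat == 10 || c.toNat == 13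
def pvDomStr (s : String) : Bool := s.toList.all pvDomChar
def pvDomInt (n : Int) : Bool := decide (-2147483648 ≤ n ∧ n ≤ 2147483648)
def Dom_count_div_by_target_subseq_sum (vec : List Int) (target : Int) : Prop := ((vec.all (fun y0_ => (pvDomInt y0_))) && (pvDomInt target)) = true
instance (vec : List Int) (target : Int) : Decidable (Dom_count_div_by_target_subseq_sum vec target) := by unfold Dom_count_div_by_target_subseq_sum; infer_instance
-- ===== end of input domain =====

-- B replaces A's prefix-sum residue hashmap by a plain double loop over all contiguous
-- subarrays (objective: simpler); equivalence is about the return value, no mutation involved.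

-- ===== PORT A =====
-- one iteration of A's loop; state = (cum, hist, ans)
def pvStepA (vec : List Int) (target : Int)
    (st : Int × PySem.Dict Int Int × Int) (n : Int) : Int × PySem.Dict Int Int × Int :=
  let cum := st.1 + PySem.List.pyGetD vec n 0
  let tmp := PySem.Int.mod cum target
  let ans := if tmp = 0 then st.2.2 + 1 else st.2.2
  match st.2.1.get? tmp with
  | some v => (cum, st.2.1.insert tmp (v + 1), ans + v)
  | none   => (cum, st.2.1.insert tmp 1, ans)

def count_div_by_target_subseq_sum (vec : List Int) (target : Int) : Int :=
  ((PySem.List.pyRange 0 (vec.length : Int)).foldl (pvStepA vec target)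
    (0, PySem.Dict.empty, 0)).2.2

-- ===== PORT B =====
-- one iteration of B's inner loop; state = (s, ans)
def pvStepInner (vec : List Int) (target : Int) (p : Int × Int) (j : Int) : Int × Int :=
  let s := p.1 + PySem.List.pyGetD vec j 0
  (s, if PySem.Int.mod s target = 0 then p.2 + 1 else p.2)

def count_div_by_target_subseq_sum_alt (vec : List Int) (target : Int) : Int :=
  (PySem.List.pyRange 0 (vec.length : Int)).foldl
    (fun ans i =>
      ((PySem.List.pyRange i (vec.length : Int)).foldl (pvStepInner vec target) (0, ans)).2)
    0

-- ===== PRECONDITION & SPEC =====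
-- Pre_ excludes nonempty vec with target = 0: there Python's '%' raises ZeroDivisionError
-- in A (and in B as well), so A returns no value.
def Pre_count_div_by_target_subseq_sum (vec : List Int) (target : Int) : Prop :=
  vec = [] ∨ target ≠ 0
instance (vec : List Int) (target : Int) : Decidable (Pre_count_div_by_target_subseq_sum vec target) := by unfold Pre_count_div_by_target_subseq_sum; infer_instance

def pvWitness_count_div_by_target_subseq_sum : List Int × Int := ([1, -2, 3, 2], 2)

def Spec_count_div_by_target_subseq_sum (vec : List Int) (target : Int) (out : Int) : Prop := out = count_div_by_target_subseq_sum_alt vec target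
instance (vec : List Int) (target : Int) (out : Int) : Decidable (Spec_count_div_by_target_subseq_sum vec target out) := by unfold Spec_count_div_by_target_subseq_sum; infer_instance

-- ===== CLAIM (what is proved, stated in full; the proofs are below) =====
def Claim_equal_count_div_by_target_subseq_sum : Prop := ∀ (vec : List Int) (target : Int), Dom_count_div_by_target_subseq_sum vec target → Pre_count_div_by_target_subseq_sum vec target → Spec_count_div_by_target_subseq_sum vec target (count_div_by_target_subseq_sum vec target)

-- ===== LEMMAS AND PROOFS =====

-- prefix sum of the first n elements
def pvPre (vec : List Int) (n : Nat) : Int := (vec.take n).sum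

-- 0/1 indicator: the subarray vec[i..j] has sum divisible by t
def pvG (vec : List Int) (t : Int) (i j : Nat) : Int :=
  if PySem.Int.mod (pvPre vec (j+1) - pvPre vec i) t = 0 then 1 else 0

-- number of prefixes pre(1..j) with Python-residue r mod t
def pvC (vec : List Int) (t : Int) (j : Nat) (r : Int) : Int :=
  ∑ k ∈ Finset.range j, (if PySem.Int.mod (pvPre vec (k+1)) t = r then (1:Int) else 0)

lemma pv_mod_eq_iff (a b t : Int) (ht : t ≠ 0) :
    PySem.Int.mod a t = PySem.Int.mod b t ↔ t ∣ (a - b) := by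
  rcases lt_or_gt_of_ne ht with hneg | hpos
  · have ha : PySem.Int.mod a t = -PySem.Int.mod (-a) (-t) := by
      rw [← PySem.Int.mod_neg_neg (-a) (-t)]; simp
    have hb : PySem.Int.mod b t = -PySem.Int.mod (-b) (-t) := by
      rw [← PySem.Int.mod_neg_neg (-b) (-t)]; simp
    rw [ha, hb, neg_inj,
        PySem.Int.mod_eq_emod_of_pos (by omega : (0:Int) < -t),
        PySem.Int.mod_eq_emod_of_pos (by omega : (0:Int) < -t),
        Int.emod_eq_emod_iff_emod_sub_eq_zero, PySem.Int.emod_eq_zero_iff_dvd]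
    constructor
    · intro ⟨c, hc⟩; exact ⟨c, by linarith⟩
    · intro ⟨c, hc⟩; exact ⟨c, by linarith⟩
  · rw [PySem.Int.mod_eq_emod_of_pos hpos, PySem.Int.mod_eq_emod_of_pos hpos,
        Int.emod_eq_emod_iff_emod_sub_eq_zero, PySem.Int.emod_eq_zero_iff_dvd]

lemma pvPre_succ (vec : List Int) (n : Nat) (hn : n < vec.length) :
    pvPre vec (n+1) = pvPre vec n + vec.getD n 0 := by
  unfold pvPre
  rw [List.take_add_one, List.sum_append, List.getElem?_eq_getElem hn]
  simp [List.getD, List.getElem?_eq_getElem hn]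

lemma pvC_nonneg (vec : List Int) (t : Int) (j : Nat) (r : Int) : 0 ≤ pvC vec t j r := by
  unfold pvC
  apply Finset.sum_nonneg
  intro k _
  split <;> norm_num

lemma pv_step_ans (vec : List Int) (t : Int) (ht : t ≠ 0) (n : Nat) :
    (if PySem.Int.mod (pvPre vec (n+1)) t = 0 then (1:Int) else 0)
      + pvC vec t n (PySem.Int.mod (pvPre vec (n+1)) t)
    = ∑ i ∈ Finset.range (n+1), pvG vec t i n := by
  rw [Finset.sum_range_succ']
  have h0 : pvG vec t 0 n = (if PySem.Int.mod (pvPre vec (n+1)) t = 0 then (1:Int) else 0) := by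
    unfold pvG pvPre
    simp
  have hk : ∀ k, pvG vec t (k+1) n
      = (if PySem.Int.mod (pvPre vec (k+1)) t = PySem.Int.mod (pvPre vec (n+1)) t then (1:Int) else 0) := by
    intro k
    have hiff : (PySem.Int.mod (pvPre vec (n+1) - pvPre vec (k+1)) t = 0)
        ↔ (PySem.Int.mod (pvPre vec (k+1)) t = PySem.Int.mod (pvPre vec (n+1)) t) := by
      rw [PySem.Int.mod_eq_zero_iff_dvd, ← pv_mod_eq_iff _ _ _ ht]
      exact eq_comm
    simp only [pvG, hiff]
  rw [h0]
  unfold pvC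
  rw [Finset.sum_congr rfl (fun k _ => (hk k))]
  ring

lemma pv_A_loop (vec : List Int) (t : Int) (ht : t ≠ 0) (n : Nat) (hn : n ≤ vec.length) :
    ∃ h : PySem.Dict Int Int,
      ((List.range n).map (fun (k : Nat) => (k : Int))).foldl (pvStepA vec t) (0, PySem.Dict.empty, 0)
        = (pvPre vec n, h, ∑ j ∈ Finset.range n, ∑ i ∈ Finset.range (j+1), pvG vec t i j)
      ∧ ∀ r, h.get? r = (if pvC vec t n r = 0 then none else some (pvC vec t n r)) := by
  induction n with
  | zero =>
    refine ⟨PySem.Dict.empty, by simp [pvPre], fun r => ?_⟩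
    simp [pvC, PySem.Dict.get?_empty]
  | succ n ih =>
    obtain ⟨h, hfold, hinv⟩ := ih (by omega)
    rw [List.range_succ, List.map_append, List.foldl_append, hfold]
    simp only [List.map_cons, List.map_nil, List.foldl_cons, List.foldl_nil]
    unfold pvStepA
    simp only [PySem.List.pyGetD_natCast]
    rw [← pvPre_succ vec n (by omega)]
    set tmp := PySem.Int.mod (pvPre vec (n+1)) t with htmp
    have hans : (if tmp = 0 then
          (∑ j ∈ Finset.range n, ∑ i ∈ Finset.range (j+1), pvG vec t i j) + 1
        else (∑ j ∈ Finset.range n, ∑ i ∈ Finset.range (j+1), pvG vec t i j))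
        = (∑ j ∈ Finset.range n, ∑ i ∈ Finset.range (j+1), pvG vec t i j)
          + (if tmp = 0 then (1:Int) else 0) := by
      split <;> ring
    have hCsucc : ∀ r, pvC vec t (n+1) r = pvC vec t n r + (if tmp = r then 1 else 0) := by
      intro r
      unfold pvC
      rw [Finset.sum_range_succ]
    have hSsucc : (∑ j ∈ Finset.range (n+1), ∑ i ∈ Finset.range (j+1), pvG vec t i j)
        = (∑ j ∈ Finset.range n, ∑ i ∈ Finset.range (j+1), pvG vec t i j)
          + ((if tmp = 0 then (1:Int) else 0) + pvC vec t n tmp) := by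
      rw [Finset.sum_range_succ, pv_step_ans vec t ht n]
    rw [hinv tmp]
    by_cases hz : pvC vec t n tmp = 0
    · rw [if_pos hz]
      refine ⟨h.insert tmp 1, ?_, ?_⟩
      · rw [hans, hSsucc, hz]
        simp
      · intro r
        by_cases hr : r = tmp
        · subst hr
          rw [PySem.Dict.get?_insert_self, hCsucc, hz, if_pos rfl]
          norm_num
        · have h0 : (if tmp = r then (1:Int) else 0) = 0 := if_neg (fun hh => hr hh.symm)
          rw [PySem.Dict.get?_insert_of_ne _ _ hr, hinv r, hCsucc, h0, add_zero]
    · rw [if_neg hz]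
      refine ⟨h.insert tmp (pvC vec t n tmp + 1), ?_, ?_⟩
      · rw [hans, hSsucc]
        simp [add_assoc]
      · intro r
        by_cases hr : r = tmp
        · subst hr
          rw [PySem.Dict.get?_insert_self, hCsucc, if_pos rfl]
          have := pvC_nonneg vec t n tmp
          rw [if_neg (by omega)]
        · have h0 : (if tmp = r then (1:Int) else 0) = 0 := if_neg (fun hh => hr hh.symm)
          rw [PySem.Dict.get?_insert_of_ne _ _ hr, hinv r, hCsucc, h0, add_zero]


lemma pv_B_inner (vec : List Int) (t : Int) (i : Nat) (m : Nat) (h : i + m ≤ vec.length)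
    (s0 ans : Int) :
    ((List.range m).map (fun (k : Nat) => ((i:Int) + (k:Int)))).foldl (pvStepInner vec t) (s0, ans)
      = (s0 + (pvPre vec (i+m) - pvPre vec i),
         ans + ∑ k ∈ Finset.range m,
           (if PySem.Int.mod (s0 + (pvPre vec (i+k+1) - pvPre vec i)) t = 0 then (1:Int) else 0)) := by
  induction m with
  | zero => simp
  | succ m ih =>
    rw [List.range_succ, List.map_append, List.foldl_append, ih (by omega)]
    simp only [List.map_cons, List.map_nil, List.foldl_cons, List.foldl_nil]
    unfold pvStepInner
    have hc : (i:Int) + (m:Int) = ((i + m : Nat) : Int) := by push_cast; ring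
    have hget : PySem.List.pyGetD vec ((i:Int) + (m:Int)) 0 = vec.getD (i+m) 0 := by
      rw [hc, PySem.List.pyGetD_natCast]
    have hstep : s0 + (pvPre vec (i+m) - pvPre vec i) + PySem.List.pyGetD vec ((i:Int) + (m:Int)) 0
        = s0 + (pvPre vec (i+(m+1)) - pvPre vec i) := by
      rw [hget]
      have : i + (m+1) = (i+m) + 1 := by omega
      rw [this, pvPre_succ vec (i+m) (by omega)]
      ring
    simp only [hstep, Finset.sum_range_succ]
    have hidx : i + m + 1 = i + (m+1) := by omega
    rw [hidx, Prod.mk.injEq]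
    refine ⟨rfl, ?_⟩
    split <;> ring

lemma pv_B_outer (vec : List Int) (t : Int) (n : Nat) (hn : n ≤ vec.length) (a0 : Int) :
    ((List.range n).map (fun (k : Nat) => (k : Int))).foldl
      (fun ans i => ((PySem.List.pyRange i (vec.length : Int)).foldl (pvStepInner vec t) (0, ans)).2) a0
      = a0 + ∑ i ∈ Finset.range n, ∑ k ∈ Finset.range (vec.length - i), pvG vec t i (i+k) := by
  induction n with
  | zero => simp
  | succ n ih =>
    rw [List.range_succ, List.map_append, List.foldl_append, ih (by omega)]
    simp only [List.map_cons, List.map_nil, List.foldl_cons, List.foldl_nil]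
    have hr : PySem.List.pyRange (n : Int) (vec.length : Int)
        = (List.range (vec.length - n)).map (fun (k : Nat) => ((n:Int) + (k:Int))) := by
      rw [PySem.List.pyRange_one]
      have : ((vec.length : Int) - (n : Int)).toNat = vec.length - n := by omega
      rw [this]
    rw [hr, pv_B_inner vec t n (vec.length - n) (by omega)]
    have hg : ∀ k, (if PySem.Int.mod (0 + (pvPre vec (n+k+1) - pvPre vec n)) t = 0 then (1:Int) else 0)
        = pvG vec t n (n+k) := by
      intro k
      unfold pvG
      rw [zero_add]
    simp only [Finset.sum_range_succ]
    rw [Finset.sum_congr rfl (fun k _ => hg k)]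
    ring

lemma pv_sum_swap (f : Nat → Nat → Int) (n : Nat) :
    ∑ j ∈ Finset.range n, ∑ i ∈ Finset.range (j+1), f i j
      = ∑ i ∈ Finset.range n, ∑ k ∈ Finset.range (n - i), f i (i+k) := by
  induction n with
  | zero => simp
  | succ n ih =>
    have h1 : ∀ i ∈ Finset.range n, ∑ k ∈ Finset.range (n + 1 - i), f i (i+k)
        = (∑ k ∈ Finset.range (n - i), f i (i+k)) + f i n := by
      intro i hi
      have hi' : i < n := Finset.mem_range.mp hi
      have h2 : n + 1 - i = (n - i) + 1 := by omega
      rw [h2, Finset.sum_range_succ]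
      congr 2
      omega
    have hR : ∑ i ∈ Finset.range (n+1), ∑ k ∈ Finset.range (n + 1 - i), f i (i+k)
        = (∑ i ∈ Finset.range n, ∑ k ∈ Finset.range (n - i), f i (i+k))
          + ((∑ i ∈ Finset.range n, f i n) + f n n) := by
      rw [Finset.sum_range_succ, Finset.sum_congr rfl h1, Finset.sum_add_distrib]
      have h3 : n + 1 - n = 1 := by omega
      rw [h3, Finset.sum_range_one]
      ring_nf
    rw [hR, Finset.sum_range_succ, ih, Finset.sum_range_succ]

-- ===== VERDICT (by name: the statement is the Claim_ definition above) =====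
theorem count_div_by_target_subseq_sum_spec : Claim_equal_count_div_by_target_subseq_sum := by
  intro vec t _hdom hpre
  unfold Spec_count_div_by_target_subseq_sum
  rcases hpre with hnil | ht
  · subst hnil; rfl
  · obtain ⟨h, hfold, -⟩ := pv_A_loop vec t ht vec.length le_rfl
    have hA : count_div_by_target_subseq_sum vec t
        = ∑ j ∈ Finset.range vec.length, ∑ i ∈ Finset.range (j+1), pvG vec t i j := by
      unfold count_div_by_target_subseq_sum
      rw [PySem.List.pyRange_zero_natCast, hfold]
    have hB : count_div_by_target_subseq_sum_alt vec t
        = ∑ i ∈ Finset.range vec.length, ∑ k ∈ Finset.range (vec.length - i), pvG vec t i (i+k) := by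
      unfold count_div_by_target_subseq_sum_alt
      rw [PySem.List.pyRange_zero_natCast, pv_B_outer vec t vec.length le_rfl 0, zero_add]
    rw [hA, hB, pv_sum_swap]
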